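-- pv_equiv track=rewrite | github.com/cabanmichal/aoc2020 | aoc2020_10.py | droppable_adapters
-- ===== SOURCE A (Python) =====
-- from typing import Iterator
--
-- def droppable_adapters(adapters: list[int]) -> Iterator[list[int]]:
--     start = 0
--     end = 2
--     group = []
--     while end < len(adapters):
--         if adapters[end] - adapters[start] <= 3:
--             group.append(start + 1)
--         elif group:
--             yield group
--             group = []
--         start += 1
--         end += 1
--
--     if group:
--         yield group
-- ===== SOURCE B (Python) =====
-- def droppable_adapters(adapters):
--     drop = [i for i in range(1, len(adapters) - 1)
--             if adapters[i + 1] - adapters[i - 1] <= 3]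
--     run = []
--     for i in drop:
--         if run and run[-1] != i - 1:
--             yield run
--             run = []
--         run.append(i)
--     if run:
--         yield run
-- ===== Notes on version B (the rewrite author's own statement) =====
-- stated objective: simpler
-- what changed: Replaces A's fused sliding-window loop that maintains start/end indices and an accumulator with two separate passes: a comprehension collecting all droppable indices, then grouping consecutive indices into runs.
import Mathlib
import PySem

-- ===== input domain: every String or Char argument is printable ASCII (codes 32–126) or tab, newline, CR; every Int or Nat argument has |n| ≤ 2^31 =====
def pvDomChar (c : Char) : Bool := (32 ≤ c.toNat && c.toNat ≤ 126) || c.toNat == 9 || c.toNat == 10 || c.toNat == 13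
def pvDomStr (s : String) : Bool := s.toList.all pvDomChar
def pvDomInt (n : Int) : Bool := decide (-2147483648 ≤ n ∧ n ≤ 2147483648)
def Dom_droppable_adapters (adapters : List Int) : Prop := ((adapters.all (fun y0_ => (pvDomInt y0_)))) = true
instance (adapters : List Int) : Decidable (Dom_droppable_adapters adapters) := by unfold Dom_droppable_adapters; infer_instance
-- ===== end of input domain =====

-- B replaces A's fused sliding-window-with-accumulator loop by two passes: first collect all
-- droppable indices with a comprehension, then group consecutive indices into runs (objective: simpler).

-- ===== PORT A =====
-- A's while loop with state (start, end = start+2, group, yielded output); indices are always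
-- in range (guarded by end < len), so pyGetD with those in-range indices is exact.
def pvALoop (adapters : List Int) (s : Nat) (group : List Int) (out : List (List Int)) :
    List (List Int) :=
  if _h : s + 2 < adapters.length then
    if PySem.List.pyGetD adapters ((s : Int) + 2) 0 - PySem.List.pyGetD adapters (s : Int) 0 ≤ 3 then
      pvALoop adapters (s + 1) (group ++ [(s : Int) + 1]) out
    else if group.isEmpty then
      pvALoop adapters (s + 1) group out
    else
      pvALoop adapters (s + 1) [] (out ++ [group])
  else
    if group.isEmpty then out else out ++ [group]
termination_by adapters.length - s

def droppable_adapters (adapters : List Int) : List (List Int) :=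
  pvALoop adapters 0 [] []

-- ===== PORT B =====
-- [i for i in range(1, len(adapters)-1) if adapters[i+1] - adapters[i-1] <= 3]
def pvDrop (adapters : List Int) : List Int :=
  (PySem.List.pyRange 1 ((adapters.length : Int) - 1) 1).filter fun i =>
    decide (PySem.List.pyGetD adapters (i + 1) 0 - PySem.List.pyGetD adapters (i - 1) 0 ≤ 3)

-- the grouping pass: for i in drop: if run and run[-1] != i-1: yield run; run = []; run.append(i)
def pvBStep (st : List (List Int) × List Int) (i : Int) : List (List Int) × List Int :=
  if st.2 ≠ [] ∧ st.2.getLast? ≠ some (i - 1) then (st.1 ++ [st.2], [i])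
  else (st.1, st.2 ++ [i])

def droppable_adapters_alt (adapters : List Int) : List (List Int) :=
  let st := (pvDrop adapters).foldl pvBStep ([], [])
  if st.2 ≠ [] then st.1 ++ [st.2] else st.1

-- ===== PRECONDITION & SPEC =====
def Spec_droppable_adapters (adapters : List Int) (out : List (List Int)) : Prop := out = droppable_adapters_alt adapters
instance (adapters : List Int) (out : List (List Int)) : Decidable (Spec_droppable_adapters adapters out) := by unfold Spec_droppable_adapters; infer_instance

-- ===== CLAIM (what is proved, stated in full; the proofs are below) =====
def Claim_equal_droppable_adapters : Prop := ∀ (adapters : List Int), Dom_droppable_adapters adapters → Spec_droppable_adapters adapters (droppable_adapters adapters)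

-- ===== LEMMAS AND PROOFS =====

-- the droppable indices not yet examined when A's loop is at start = s
def pvDropFrom (adapters : List Int) (s : Nat) : List Int :=
  (PySem.List.pyRange ((s : Int) + 1) ((adapters.length : Int) - 1) 1).filter fun i =>
    decide (PySem.List.pyGetD adapters (i + 1) 0 - PySem.List.pyGetD adapters (i - 1) 0 ≤ 3)

-- finish B's fold from an intermediate state
def pvBFin (l : List Int) (out : List (List Int)) (run : List Int) : List (List Int) :=
  let st := l.foldl pvBStep (out, run)
  if st.2 ≠ [] then st.1 ++ [st.2] else st.1

lemma pvDropFrom_cons (adapters : List Int) (s : Nat) (h : s + 2 < adapters.length) :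
    pvDropFrom adapters s =
      (if PySem.List.pyGetD adapters ((s : Int) + 2) 0 - PySem.List.pyGetD adapters (s : Int) 0 ≤ 3
        then [(s : Int) + 1] else []) ++ pvDropFrom adapters (s + 1) := by
  unfold pvDropFrom
  rw [PySem.List.pyRange_one_cons (by omega)]
  simp only [List.filter_cons]
  have h3 : ((s + 1 : Nat) : Int) = (s : Int) + 1 := by push_cast; ring
  have h1 : (s : Int) + 1 + 1 = (s : Int) + 2 := by ring
  have h2 : (s : Int) + 1 - 1 = (s : Int) := by ring
  rw [h3, h1, h2]
  split_ifs with hc hp hq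
  · simp
  · exact absurd (of_decide_eq_true hc) hp
  · exact absurd hq (by simpa using hc)
  · simp

lemma pvDropFrom_nil (adapters : List Int) (s : Nat) (h : ¬ s + 2 < adapters.length) :
    pvDropFrom adapters s = [] := by
  unfold pvDropFrom
  rw [PySem.List.pyRange_one_eq_nil (by omega)]
  rfl

-- core invariant: A's loop from state (s, group, out) equals B's grouping of the remaining
-- droppable indices, in two coupled forms (group live with last element s / group already emitted).
lemma pvMain (adapters : List Int) (s : Nat) :
    (∀ (out : List (List Int)) (run : List Int),
      (run = [] ∨ run.getLast? = some (s : Int)) →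
      pvALoop adapters s run out = pvBFin (pvDropFrom adapters s) out run) ∧
    (∀ (out : List (List Int)) (run : List Int) (j : Int),
      run.getLast? = some j → j < (s : Int) →
      pvALoop adapters s [] (out ++ [run]) = pvBFin (pvDropFrom adapters s) out run) := by
  induction' hk : adapters.length - s using Nat.strong_induction_on with k ih generalizing s
  have step := fun (s' : Nat) (h : adapters.length - s' < k) => ih _ h s' rfl
  by_cases h : s + 2 < adapters.length
  · have hlt : adapters.length - (s + 1) < k := by omega
    have ihs := step (s + 1) hlt
    rw [pvDropFrom_cons adapters s h] at *
    by_cases hc : PySem.List.pyGetD adapters ((s : Int) + 2) 0 - PySem.List.pyGetD adapters (s : Int) 0 ≤ 3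
    · simp only [hc, if_pos]
      constructor
      · intro out run hrun
        rw [pvALoop]
        simp only [h, dif_pos, hc, if_pos]
        have hstep : pvBStep (out, run) ((s : Int) + 1) = (out, run ++ [(s : Int) + 1]) := by
          unfold pvBStep
          rcases hrun with h0 | h0
          · subst h0; simp
          · simp [h0]
        have : pvBFin ([(s:Int)+1] ++ pvDropFrom adapters (s+1)) out run
            = pvBFin (pvDropFrom adapters (s+1)) out (run ++ [(s:Int)+1]) := by
          unfold pvBFin; rw [List.singleton_append, List.foldl_cons, hstep]
        rw [this]
        exact ihs.1 out (run ++ [(s : Int) + 1]) (Or.inr (by simp))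
      · intro out run j hj hjs
        rw [pvALoop]
        simp only [h, dif_pos, hc, if_pos]
        have hstep : pvBStep (out, run) ((s : Int) + 1) = (out ++ [run], [(s : Int) + 1]) := by
          unfold pvBStep
          have hne : run ≠ [] := by intro h0; simp [h0] at hj
          simp [hne, hj]; omega
        have : pvBFin ([(s:Int)+1] ++ pvDropFrom adapters (s+1)) out run
            = pvBFin (pvDropFrom adapters (s+1)) (out ++ [run]) [(s:Int)+1] := by
          unfold pvBFin; rw [List.singleton_append, List.foldl_cons, hstep]
        rw [this]
        have := ihs.1 (out ++ [run]) [(s : Int) + 1] (Or.inr (by simp))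
        simpa using this
    · simp only [hc, if_false, List.nil_append]
      constructor
      · intro out run hrun
        rw [pvALoop]
        simp only [h, dif_pos, hc, if_false]
        rcases hrun with h0 | h0
        · subst h0; simp only [List.isEmpty_nil, if_true]
          exact ihs.1 out [] (Or.inl rfl)
        · have hne : run ≠ [] := by intro he; simp [he] at h0
          simp only [List.isEmpty_iff, hne, if_false]
          exact ihs.2 out run (s : Int) h0 (by push_cast; omega)
      · intro out run j hj hjs
        rw [pvALoop]
        simp only [h, dif_pos, hc, if_false, List.isEmpty_nil, if_true]
        exact ihs.2 out run j hj (by push_cast; omega)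
  · rw [pvDropFrom_nil adapters s h]
    constructor
    · intro out run _
      rw [pvALoop]
      simp only [h, dif_neg, not_false_iff]
      unfold pvBFin
      simp only [List.foldl_nil]
      by_cases hr : run = [] <;> simp [hr]
    · intro out run j hj _
      rw [pvALoop]
      have hne : run ≠ [] := by intro he; simp [he] at hj
      simp only [h, dif_neg, not_false_iff, List.isEmpty_nil, if_true]
      unfold pvBFin
      simp [hne]

-- ===== VERDICT (by name: the statement is the Claim_ definition above) =====
theorem droppable_adapters_spec : Claim_equal_droppable_adapters := by
  intro adapters _
  unfold Spec_droppable_adapters droppable_adapters droppable_adapters_alt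
  have h := (pvMain adapters 0).1 [] [] (Or.inl rfl)
  rw [h]
  have hd : pvDropFrom adapters 0 = pvDrop adapters := by
    unfold pvDropFrom pvDrop; norm_num
  rw [hd]; rfl
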